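-- pv_equiv track=rewrite | github.com/daniel-reich/ubiquitous-fiesta | k87ztfzqrpPHvgNWR_18.py | widen_streets
-- ===== SOURCE A (Python) =====
-- def widen_streets(lst, n):
--   for i in range(len(lst)):
--     if ' '*3 in lst[i]:
--       lst[i]=lst[i].replace('   ', ' * ')
--   for i in range(len(lst)):
--     lst[i]=lst[i].replace(' ', ' '*n)
--   for i in range(len(lst)):
--     if '*' in lst[i]:
--       lst[i]=lst[i].replace('*', ' ')
--   return lst
-- ===== SOURCE B (Python) =====
-- def widen_streets(lst, n):
--     pad = ' ' * n
--     for i in range(len(lst)):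
--         lst[i] = _widen(lst[i], pad)
--     return lst
--
-- def _widen(s, pad):
--     """Widen gaps in one string: every full group of three consecutive spaces
--     becomes pad-space-pad, each leftover space becomes pad, a '*' marks a
--     fixed one-space gap, and all other characters are copied unchanged."""
--     parts = []
--     i = 0
--     while i < len(s):
--         c = s[i]
--         if c == ' ':
--             j = i
--             while j < len(s) and s[j] == ' ':
--                 j += 1
--             q, r = divmod(j - i, 3)
--             parts.append((pad + ' ' + pad) * q + pad * r)
--             i = j
--         elif c == '*':
--             parts.append(' ')
--             i += 1
--         else:
--             parts.append(c)
--             i += 1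
--     return ''.join(parts)
-- ===== Notes on version B (the rewrite author's own statement) =====
-- stated objective: alternative
-- what changed: B replaces A's three sequential .replace passes (space-triples to ' * ', space expansion, '*' to space) with a single left-to-right scan per string: each maximal run of spaces is split by divmod into full triples (each widened to pad-space-pad) plus leftover spaces (each widened to pad), '*' marks a fixed one-space gap, other characters are copied; lst is mutated in place as in A.
import Mathlib
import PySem

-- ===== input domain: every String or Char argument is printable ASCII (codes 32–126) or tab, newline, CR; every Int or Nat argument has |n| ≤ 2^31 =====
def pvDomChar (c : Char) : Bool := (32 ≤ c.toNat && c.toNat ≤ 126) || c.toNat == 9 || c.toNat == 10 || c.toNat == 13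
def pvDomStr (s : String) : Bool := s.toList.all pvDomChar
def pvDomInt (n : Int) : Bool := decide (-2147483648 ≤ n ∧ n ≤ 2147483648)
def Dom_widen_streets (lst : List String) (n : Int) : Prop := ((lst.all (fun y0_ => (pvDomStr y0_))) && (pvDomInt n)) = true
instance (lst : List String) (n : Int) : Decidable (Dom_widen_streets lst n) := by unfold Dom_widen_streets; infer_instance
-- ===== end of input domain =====

-- B replaces A's three sequential .replace passes by one run-grouping scan per string; equivalence is
-- about the returned list (in Python both A and B mutate lst in place and return the same list object).

-- ===== PORT A =====
def widen_streets (lst : List String) (n : Int) : List String :=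
  -- loop 1: if '   ' in lst[i]: lst[i] = lst[i].replace('   ', ' * ')
  let l1 := lst.map (fun s => if PySem.Str.isIn "   " s then PySem.Str.replace s "   " " * " else s)
  -- loop 2: lst[i] = lst[i].replace(' ', ' '*n)   (' '*n ported exactly via pyRepeat)
  let l2 := l1.map (fun s => PySem.Str.replace s " " (String.ofList (PySem.List.pyRepeat " ".toList n)))
  -- loop 3: if '*' in lst[i]: lst[i] = lst[i].replace('*', ' ')
  l2.map (fun s => if PySem.Str.isIn "*" s then PySem.Str.replace s "*" " " else s)

-- ===== PORT B =====
-- Source B's inner `while j < len(s) and s[j] == ' '` loop: length of the leading run of spaces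
def pvRunLen : List Char → Nat
  | [] => 0
  | c :: t => if c = ' ' then pvRunLen t + 1 else 0

-- Source B's outer while loop over s: for a maximal run of L spaces, with q, r = divmod(L, 3),
-- emit (pad + ' ' + pad) * q + pad * r; '*' -> ' '; copy other chars
def pvWiden (pad : List Char) : List Char → List Char
  | [] => []
  | c :: t =>
    if c = ' ' then
      let L := pvRunLen t + 1
      (List.replicate (L / 3) (pad ++ ' ' :: pad)).flatten
        ++ (List.replicate (L % 3) pad).flatten ++ pvWiden pad (t.drop (pvRunLen t))
    else if c = '*' then ' ' :: pvWiden pad t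
    else c :: pvWiden pad t
  termination_by l => l.length
  decreasing_by all_goals (simp only [List.length_cons, List.length_drop]; omega)

def widen_streets_alt (lst : List String) (n : Int) : List String :=
  let pad := PySem.List.pyRepeat " ".toList n   -- pad = ' ' * n
  lst.map (fun s => String.ofList (pvWiden pad s.toList))

-- ===== PRECONDITION & SPEC =====
def Spec_widen_streets (lst : List String) (n : Int) (out : List String) : Prop := out = widen_streets_alt lst n
instance (lst : List String) (n : Int) (out : List String) : Decidable (Spec_widen_streets lst n out) := by unfold Spec_widen_streets; infer_instance

-- ===== CLAIM (what is proved, stated in full; the proofs are below) =====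
def Claim_equal_widen_streets : Prop := ∀ (lst : List String) (n : Int), Dom_widen_streets lst n → Spec_widen_streets lst n (widen_streets lst n)

-- ===== LEMMAS AND PROOFS =====

-- structural equations for PySem.Chars.replace (no lemmas about it exist in the prelude)
theorem pv_go_acc (old new : List Char) (h : old ≠ []) :
    ∀ fuel l acc, l.length ≤ fuel →
      PySem.Chars.replace.go old new fuel l acc
        = acc.reverse ++ PySem.Chars.replace.go old new l.length l [] := by
  intro fuel
  induction fuel using Nat.strong_induction_on with
  | _ fuel ih =>
    intro l acc hlen
    match fuel, l with
    | 0, l =>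
      interval_cases hl : l.length
      · simp_all [List.length_eq_zero_iff.mp hl, PySem.Chars.replace.go]
    | (f+1), [] => simp [PySem.Chars.replace.go]
    | (f+1), (c :: t) =>
      have ht : t.length ≤ f := by simpa using hlen
      rw [PySem.Chars.replace.go]
      conv_rhs => rw [show (c :: t).length = t.length + 1 from rfl, PySem.Chars.replace.go]
      by_cases hp : old.isPrefixOf (c :: t)
      · simp only [hp, if_true]
        have hd : (List.drop old.length (c :: t)).length ≤ t.length := by
          have : 1 ≤ old.length := by cases old <;> simp_all
          simp; omega
        rw [ih f (by omega) _ _ (le_trans hd ht),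
            ih t.length (by omega) _ _ hd]
        simp
      · simp only [hp]
        conv_rhs => rw [ih t.length (by omega) t [c] le_rfl]
        rw [ih f (by omega) _ _ ht]
        simp

theorem pv_replace_nil (old new : List Char) (h : old ≠ []) :
    PySem.Chars.replace [] old new = [] := by
  simp [PySem.Chars.replace, h, PySem.Chars.replace.go]

theorem pv_replace_cons (old new : List Char) (c : Char) (t : List Char) (h : old ≠ []) :
    PySem.Chars.replace (c :: t) old new =
      if old.isPrefixOf (c :: t) then new ++ PySem.Chars.replace ((c :: t).drop old.length) old new
      else c :: PySem.Chars.replace t old new := by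
  have hne : old.isEmpty = false := by cases old <;> simp_all
  have h1 : 1 ≤ old.length := by cases old <;> simp_all
  simp only [PySem.Chars.replace, hne, Bool.false_eq_true, if_false]
  rw [show (c :: t).length = t.length + 1 from rfl, PySem.Chars.replace.go]
  by_cases hp : old.isPrefixOf (c :: t)
  · simp only [hp, if_true]
    have hd : (List.drop old.length (c :: t)).length ≤ t.length := by simp; omega
    rw [pv_go_acc old new h t.length _ _ hd]
    simp
  · simp only [hp]
    rw [pv_go_acc old new h t.length t [c] le_rfl]
    simp

theorem pv_replace_single (a : Char) (new : List Char) (cs : List Char) :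
    PySem.Chars.replace cs [a] new = cs.flatMap (fun c => if c = a then new else [c]) := by
  induction cs with
  | nil => simp [pv_replace_nil]
  | cons c t ih =>
    rw [pv_replace_cons _ _ _ _ (by simp)]
    by_cases hc : c = a
    · simp [hc, List.isPrefixOf, ih]
    · simp [hc, List.isPrefixOf, Ne.symm hc, ih]

theorem pv_replace_of_not_infix (old new cs : List Char) (h : old ≠ []) (hno : ¬ old <:+: cs) :
    PySem.Chars.replace cs old new = cs := by
  induction cs with
  | nil => exact pv_replace_nil old new h
  | cons c t ih =>
    rw [List.infix_cons_iff] at hno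
    rw [not_or] at hno
    rw [pv_replace_cons _ _ _ _ h]
    have hp : old.isPrefixOf (c :: t) = false := by
      rw [Bool.eq_false_iff]
      intro hc
      exact hno.1 (List.isPrefixOf_iff_prefix.mp hc)
    simp [hp, ih hno.2]

-- run decomposition for pvRunLen
theorem pvRunLen_decomp (cs : List Char) :
    cs = List.replicate (pvRunLen cs) ' ' ++ cs.drop (pvRunLen cs)
      ∧ (cs.drop (pvRunLen cs)).head? ≠ some ' ' := by
  induction cs with
  | nil => simp [pvRunLen]
  | cons c t ih =>
    by_cases hc : c = ' '
    · simp only [pvRunLen, hc, if_true]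
      refine ⟨?_, by simpa using ih.2⟩
      conv_lhs => rw [show (' ' :: t) = ' ' :: t from rfl]
      simp only [List.replicate_succ, List.cons_append, List.drop_succ_cons]
      exact congrArg (' ' :: ·) ih.1
    · simp [pvRunLen, hc]

-- how A's first pass acts on a maximal run of spaces
theorem pv_replace_run (L : Nat) (rest : List Char) (h : rest.head? ≠ some ' ') :
    PySem.Chars.replace (List.replicate L ' ' ++ rest) [' ', ' ', ' '] [' ', '*', ' ']
      = (List.replicate (L / 3) [' ', '*', ' ']).flatten ++ List.replicate (L % 3) ' '
          ++ PySem.Chars.replace rest [' ', ' ', ' '] [' ', '*', ' '] := by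
  have hsp : ([' ', ' ', ' '] : List Char) ≠ [] := by simp
  have hnp : ¬ ([' '] : List Char) <+: rest := by
    cases rest with
    | nil => simp
    | cons r t =>
      intro hc
      have : ' ' = r := (List.cons_prefix_cons.mp hc).1
      simp [← this] at h
  have hnp2 : ¬ ([' ', ' '] : List Char) <+: rest := by
    intro hc
    exact hnp (List.IsPrefix.trans (by simp) hc)
  induction L using Nat.strong_induction_on with
  | _ L ih =>
    rcases L with _ | _ | _ | L
    · simp
    · rw [show (List.replicate 1 ' ' ++ rest) = ' ' :: rest by simp,
          pv_replace_cons _ _ _ _ hsp]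
      have hp : ([' ', ' ', ' '] : List Char).isPrefixOf (' ' :: rest) = false := by
        rw [Bool.eq_false_iff]
        intro hc
        exact hnp2 ((List.cons_prefix_cons.mp (List.isPrefixOf_iff_prefix.mp hc)).2)
      simp only [hp, Bool.false_eq_true, if_false]
      norm_num
    · rw [show (List.replicate 2 ' ' ++ rest) = ' ' :: (List.replicate 1 ' ' ++ rest) by
            simp [List.replicate_succ],
          pv_replace_cons _ _ _ _ hsp]
      have hp : ([' ', ' ', ' '] : List Char).isPrefixOf (' ' :: (List.replicate 1 ' ' ++ rest)) = false := by
        rw [Bool.eq_false_iff]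
        intro hc
        have h2 := (List.cons_prefix_cons.mp (List.isPrefixOf_iff_prefix.mp hc)).2
        rw [show (List.replicate 1 ' ' ++ rest) = ' ' :: rest by simp] at h2
        exact hnp ((List.cons_prefix_cons.mp h2).2)
      rw [ih 1 (by omega)]
      simp only [hp, Bool.false_eq_true, if_false]
      norm_num
      simp [List.replicate_succ]

    · have hshape : (List.replicate (L + 1 + 1 + 1) ' ' ++ rest)
            = ' ' :: ' ' :: ' ' :: (List.replicate L ' ' ++ rest) := by
        simp only [List.replicate_succ, List.cons_append]
      rw [hshape, pv_replace_cons _ _ _ _ hsp]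
      have hp : ([' ', ' ', ' '] : List Char).isPrefixOf
          (' ' :: ' ' :: ' ' :: (List.replicate L ' ' ++ rest)) = true := by
        apply List.isPrefixOf_iff_prefix.mpr
        exact ⟨List.replicate L ' ' ++ rest, rfl⟩
      simp only [hp, if_true, List.length_cons, List.length_nil]
      rw [show List.drop (0 + 1 + 1 + 1) (' ' :: ' ' :: ' ' :: (List.replicate L ' ' ++ rest))
            = List.replicate L ' ' ++ rest from rfl]
      rw [ih L (by omega)]
      have hdiv : (L + 1 + 1 + 1) / 3 = L / 3 + 1 := by omega
      have hmod : (L + 1 + 1 + 1) % 3 = L % 3 := by omega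
      rw [hdiv, hmod, List.replicate_succ, List.flatten_cons]
      simp [List.append_assoc]

-- the per-character expansion performed by A's passes 2 and 3 combined
def pvE (m : Nat) (c : Char) : List Char :=
  if c = ' ' then List.replicate m ' ' else if c = '*' then [' '] else [c]

-- pass 2 / pass 3 as per-character expansions
def pvH (m : Nat) (c : Char) : List Char := if c = ' ' then List.replicate m ' ' else [c]
def pvH3 (c : Char) : List Char := if c = '*' then [' '] else [c]

theorem pvH3_spaces (j : Nat) : (List.replicate j ' ').flatMap pvH3 = List.replicate j ' ' := by
  induction j with
  | zero => simp
  | succ j ih => simp [List.replicate_succ, ih, pvH3]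

theorem pvH_then_pvH3 (m : Nat) (c : Char) : (pvH m c).flatMap pvH3 = pvE m c := by
  by_cases hs : c = ' '
  · simp [pvH, pvE, hs, pvH3_spaces]
  · by_cases hst : c = '*' <;> simp [pvH, pvE, pvH3, hs, hst]

theorem pvE_spaces (m j : Nat) : (List.replicate j ' ').flatMap (pvE m) = List.replicate (j * m) ' ' := by
  induction j with
  | zero => simp
  | succ j ih =>
    rw [List.replicate_succ, List.flatMap_cons, ih,
        show pvE m ' ' = List.replicate m ' ' from rfl, ← List.replicate_add]
    congr 1
    ring

theorem pvE_starRuns (m k : Nat) :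
    ((List.replicate k ([' ', '*', ' '] : List Char)).flatten).flatMap (pvE m)
      = List.replicate (k * (2 * m + 1)) ' ' := by
  induction k with
  | zero => simp
  | succ k ih =>
    rw [List.replicate_succ, List.flatten_cons, List.flatMap_append, ih]
    have hstar : ([' ', '*', ' '] : List Char).flatMap (pvE m) = List.replicate (2 * m + 1) ' ' := by
      have h1 : pvE m ' ' = List.replicate m ' ' := rfl
      have h2 : pvE m '*' = [' '] := rfl
      rw [show ([' ', '*', ' '] : List Char).flatMap (pvE m)
            = pvE m ' ' ++ (pvE m '*' ++ (pvE m ' ' ++ [])) from rfl, h1, h2]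
      simp only [List.append_nil]
      rw [show ([' '] ++ List.replicate m ' ') = List.replicate (m + 1) ' ' from rfl,
          ← List.replicate_add]
      congr 1
      omega
    rw [hstar, ← List.replicate_add]
    congr 1
    ring

-- flattening Source B's per-run pieces, for pad = replicate m ' '
theorem pv_flat_group (m q : Nat) :
    (List.replicate q (List.replicate m ' ' ++ ' ' :: List.replicate m ' ')).flatten
      = List.replicate (q * (2 * m + 1)) ' ' := by
  induction q with
  | zero => simp
  | succ q ih =>
    rw [List.replicate_succ, List.flatten_cons, ih]
    have hunit : (List.replicate m ' ' ++ ' ' :: List.replicate m ' ')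
        = List.replicate (2 * m + 1) ' ' := by
      rw [show (' ' :: List.replicate m ' ') = List.replicate (m + 1) ' ' from rfl,
          ← List.replicate_add]
      congr 1
      omega
    rw [hunit, ← List.replicate_add]
    congr 1
    ring

theorem pv_main (m : Nat) (cs : List Char) :
    (PySem.Chars.replace cs [' ', ' ', ' '] [' ', '*', ' ']).flatMap (pvE m)
      = pvWiden (List.replicate m ' ') cs := by
  induction hl : cs.length using Nat.strong_induction_on generalizing cs with
  | _ N ih =>
    match cs with
    | [] => simp [pv_replace_nil, pvWiden]
    | c :: t =>
      by_cases hc : c = ' '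
      · subst hc
        have hd := pvRunLen_decomp (' ' :: t)
        have hrl : pvRunLen (' ' :: t) = pvRunLen t + 1 := by simp [pvRunLen]
        rw [hrl] at hd
        have hdrop : (' ' :: t).drop (pvRunLen t + 1) = t.drop (pvRunLen t) := rfl
        rw [hdrop] at hd
        have hlen : (t.drop (pvRunLen t)).length < N := by
          subst hl
          simp only [List.length_cons, List.length_drop]
          omega
        conv_lhs => rw [hd.1]
        rw [pv_replace_run (pvRunLen t + 1) _ hd.2, List.flatMap_append, List.flatMap_append,
            pvE_starRuns, pvE_spaces, ih _ hlen _ rfl]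
        conv_rhs => rw [pvWiden]
        simp [pv_flat_group]
      · have hp : ([' ', ' ', ' '] : List Char).isPrefixOf (c :: t) = false := by
          rw [Bool.eq_false_iff]
          intro hpre
          exact hc ((List.cons_prefix_cons.mp (List.isPrefixOf_iff_prefix.mp hpre)).1.symm)
        have hlen : t.length < N := by subst hl; simp
        rw [pv_replace_cons _ _ _ _ (by simp), hp]
        simp only [Bool.false_eq_true, if_false, List.flatMap_cons, ih _ hlen _ rfl]
        by_cases hst : c = '*'
        · subst hst
          rw [pvWiden]
          simp [pvE]
        · rw [pvWiden]
          simp [pvE, hc, hst]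

-- moving one step of A's pipeline to the Chars level
theorem pv_step1 (s : String) :
    (if PySem.Str.isIn "   " s then PySem.Str.replace s "   " " * " else s)
      = String.ofList (PySem.Chars.replace s.toList [' ', ' ', ' '] [' ', '*', ' ']) := by
  by_cases hin : PySem.Str.isIn "   " s
  · rw [if_pos hin]; rfl
  · rw [if_neg hin]
    have hni : ¬ ([' ', ' ', ' '] : List Char) <:+: s.toList := by
      have := (PySem.Chars.isIn_eq_false_iff ("   ".toList) s.toList).mp
        (by rw [← PySem.Str.isIn_eq]; simpa using hin)
      simpa using this
    rw [pv_replace_of_not_infix _ _ _ (by simp) hni, String.ofList_toList]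

theorem pv_step3 (s : String) :
    (if PySem.Str.isIn "*" s then PySem.Str.replace s "*" " " else s)
      = String.ofList (s.toList.flatMap pvH3) := by
  have hrepl : PySem.Chars.replace s.toList ['*'] [' '] = s.toList.flatMap pvH3 := by
    rw [pv_replace_single]; rfl
  by_cases hin : PySem.Str.isIn "*" s
  · rw [if_pos hin, ← hrepl]; rfl
  · rw [if_neg hin]
    have hni : ¬ (['*'] : List Char) <:+: s.toList := by
      have := (PySem.Chars.isIn_eq_false_iff ("*".toList) s.toList).mp
        (by rw [← PySem.Str.isIn_eq]; simpa using hin)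
      simpa using this
    rw [← hrepl, pv_replace_of_not_infix _ _ _ (by simp) hni, String.ofList_toList]

theorem pv_pipeline (n : Int) (s : String) :
    (if PySem.Str.isIn "*"
          (PySem.Str.replace (if PySem.Str.isIn "   " s then PySem.Str.replace s "   " " * " else s)
            " " (String.ofList (PySem.List.pyRepeat " ".toList n))) then
        PySem.Str.replace
          (PySem.Str.replace (if PySem.Str.isIn "   " s then PySem.Str.replace s "   " " * " else s)
            " " (String.ofList (PySem.List.pyRepeat " ".toList n))) "*" " "
      else
        PySem.Str.replace (if PySem.Str.isIn "   " s then PySem.Str.replace s "   " " * " else s)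
          " " (String.ofList (PySem.List.pyRepeat " ".toList n)))
      = String.ofList (pvWiden (PySem.List.pyRepeat " ".toList n) s.toList) := by
  have hpad : PySem.List.pyRepeat " ".toList n = List.replicate n.toNat ' ' := by
    exact PySem.List.pyRepeat_singleton ' ' n
  have hstep2 : ∀ u : String,
      PySem.Str.replace u " " (String.ofList (PySem.List.pyRepeat " ".toList n))
        = String.ofList (u.toList.flatMap (pvH n.toNat)) := by
    intro u
    have : PySem.Str.replace u " " (String.ofList (PySem.List.pyRepeat " ".toList n))
        = String.ofList (PySem.Chars.replace u.toList [' ']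
            (String.ofList (PySem.List.pyRepeat " ".toList n)).toList) := rfl
    rw [this, String.toList_ofList, hpad, pv_replace_single]
    rfl
  rw [pv_step1, hstep2, pv_step3, String.toList_ofList, String.toList_ofList,
      List.flatMap_assoc]
  have hE : (fun c => (pvH n.toNat c).flatMap pvH3) = pvE n.toNat := by
    funext c
    exact pvH_then_pvH3 n.toNat c
  rw [hE, pv_main, hpad]

-- ===== VERDICT (by name: the statement is the Claim_ definition above) =====
theorem widen_streets_spec : Claim_equal_widen_streets := by
  intro lst n _
  show _ = _
  rw [widen_streets, widen_streets_alt]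
  simp only [List.map_map]
  apply List.map_congr_left
  intro s _
  simp only [Function.comp]
  rw [pv_pipeline n s]
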